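-- pv_equiv track=rewrite | github.com/ekazakos/grove | grove_transformers/grove_transformers/processing_grove.py | sliding_segment_with_mask
-- ===== SOURCE A (Python) =====
-- from typing import List, Tuple, Optional, Dict, Any
--
-- def sliding_segment_with_mask(num_frames: int, num_segments: int) -> Tuple[List[List[int]], List[List[int]]]:
--     """Sliding window sampling with masks."""
--     segment_size = num_frames // num_segments
--     remainder = num_frames % num_segments
--     all_indices: List[List[int]] = []
--     masks: List[List[int]] = []
--     seen = set()
--     for offset in range(segment_size):
--         frame_indices = [i * segment_size + offset for i in range(num_segments)]
--         mask = [1 if idx not in seen else 0 for idx in frame_indices]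
--         all_indices.append(frame_indices)
--         masks.append(mask)
--         seen.update(frame_indices)
--     if remainder > 0:
--         for offset in range(remainder):
--             frame_indices = [i * segment_size + segment_size + offset for i in range(num_segments)]
--             frame_indices = [idx for idx in frame_indices if idx < num_frames]
--             if frame_indices:
--                 mask = [1 if idx not in seen else 0 for idx in frame_indices]
--                 all_indices.append(frame_indices)
--                 masks.append(mask)
--                 seen.update(frame_indices)
--     return all_indices, masks
-- ===== SOURCE B (Python) =====
-- def sliding_segment_with_mask(num_frames, num_segments):
--     """Sliding window sampling with masks (closed-form masks, no seen-set)."""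
--     segment_size = num_frames // num_segments
--     remainder = num_frames % num_segments
--     first = [[i * segment_size + offset for i in range(num_segments)]
--              for offset in range(segment_size)]
--     second = [[(i + 1) * segment_size + offset for i in range(num_segments)]
--               for offset in range(remainder)]
--     if segment_size == 0:
--         tail_mask = [1] * num_segments
--     else:
--         tail_mask = [0] * (num_segments - 1) + [1]
--     return first + second, [[1] * num_segments] * len(first) + [tail_mask] * len(second)
-- ===== Notes on version B (the rewrite author's own statement) =====
-- stated objective: simpler
-- what changed: B drops A's `seen` set, per-index membership tests and `< num_frames` filter entirely: it builds both offset passes as plain comprehensions and emits the masks in closed form (all-ones rows for the first pass, one fixed tail mask for the remainder pass), proven from the overlap structure of the windows.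
-- outside the precondition, e.g. on sliding_segment_with_mask(0, 0): A raises ZeroDivisionError, B raises ZeroDivisionError; on sliding_segment_with_mask(-1, 2): A returns ([[-2]], [[1]]), B returns ([[-1, -2]], [[0, 1]])
import Mathlib
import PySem

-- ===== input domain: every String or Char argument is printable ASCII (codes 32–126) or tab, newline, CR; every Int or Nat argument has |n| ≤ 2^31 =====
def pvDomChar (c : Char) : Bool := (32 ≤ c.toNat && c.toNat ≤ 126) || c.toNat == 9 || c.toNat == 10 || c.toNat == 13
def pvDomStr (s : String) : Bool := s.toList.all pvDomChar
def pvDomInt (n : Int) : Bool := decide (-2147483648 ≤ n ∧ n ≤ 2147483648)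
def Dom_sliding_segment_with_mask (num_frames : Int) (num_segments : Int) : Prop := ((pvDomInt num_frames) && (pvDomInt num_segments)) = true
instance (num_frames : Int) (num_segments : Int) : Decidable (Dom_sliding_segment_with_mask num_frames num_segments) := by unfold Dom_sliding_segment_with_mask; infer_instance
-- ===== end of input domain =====

-- B drops A's `seen` set and per-element dedup tests: the masks are produced in closed form
-- (all-ones rows for the first pass, one fixed tail mask for the remainder pass); objective: simpler.

-- ===== PORT A =====
-- body of A's first `for offset …` loop (append window, append mask, seen.update)
def pvStepA1 (s n : Int) (st : List (List Int) × List (List Int) × PySem.Set Int) (off : Int) :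
    List (List Int) × List (List Int) × PySem.Set Int :=
  let fi := (PySem.List.pyRange 0 n 1).map (fun i => i * s + off)
  let mask := fi.map (fun idx => if PySem.Set.contains st.2.2 idx then (0 : Int) else 1)
  (st.1 ++ [fi], st.2.1 ++ [mask], PySem.Set.update st.2.2 fi)

-- body of A's second `for offset …` loop (filter `idx < num_frames`, skip empty windows)
def pvStepA2 (nf s n : Int) (st : List (List Int) × List (List Int) × PySem.Set Int) (off : Int) :
    List (List Int) × List (List Int) × PySem.Set Int :=
  let fi := ((PySem.List.pyRange 0 n 1).map (fun i => i * s + s + off)).filter (fun idx => decide (idx < nf))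
  if fi.isEmpty then st
  else
    let mask := fi.map (fun idx => if PySem.Set.contains st.2.2 idx then (0 : Int) else 1)
    (st.1 ++ [fi], st.2.1 ++ [mask], PySem.Set.update st.2.2 fi)

def sliding_segment_with_mask (num_frames : Int) (num_segments : Int) : List (List Int) × List (List Int) :=
  let s := PySem.Int.floordiv num_frames num_segments
  let r := PySem.Int.mod num_frames num_segments
  let st1 := (PySem.List.pyRange 0 s 1).foldl (pvStepA1 s num_segments) ([], [], PySem.Set.empty)
  let st2 := if r > 0 then (PySem.List.pyRange 0 r 1).foldl (pvStepA2 num_frames s num_segments) st1 else st1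
  (st2.1, st2.2.1)

-- ===== PORT B =====
def sliding_segment_with_mask_alt (num_frames : Int) (num_segments : Int) : List (List Int) × List (List Int) :=
  let s := PySem.Int.floordiv num_frames num_segments
  let r := PySem.Int.mod num_frames num_segments
  let first := (PySem.List.pyRange 0 s 1).map (fun off => (PySem.List.pyRange 0 num_segments 1).map (fun i => i * s + off))
  let second := (PySem.List.pyRange 0 r 1).map (fun off => (PySem.List.pyRange 0 num_segments 1).map (fun i => (i + 1) * s + off))
  let tail_mask := if s = 0 then PySem.List.pyRepeat [(1 : Int)] num_segments
                   else PySem.List.pyRepeat [(0 : Int)] (num_segments - 1) ++ [(1 : Int)]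
  (first ++ second,
   PySem.List.pyRepeat [PySem.List.pyRepeat [(1 : Int)] num_segments] (first.length : Int)
     ++ PySem.List.pyRepeat [tail_mask] (second.length : Int))

-- ===== PRECONDITION & SPEC =====
-- Pre_ excludes num_segments = 0, where A raises ZeroDivisionError, and the off-domain corner
-- num_frames < 0 with 0 < num_segments and num_frames % num_segments ≠ 0, where a frame count is
-- meaningless and A's partially `< num_frames`-filtered windows of negative indices are an
-- artefact of floor division.
def Pre_sliding_segment_with_mask (num_frames : Int) (num_segments : Int) : Prop :=
  num_segments ≠ 0 ∧ (0 ≤ num_frames ∨ num_segments < 0 ∨ PySem.Int.mod num_frames num_segments = 0)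
instance (num_frames : Int) (num_segments : Int) : Decidable (Pre_sliding_segment_with_mask num_frames num_segments) := by
  unfold Pre_sliding_segment_with_mask; infer_instance
def pvWitness_sliding_segment_with_mask : Int × Int := (7, 3)

def Spec_sliding_segment_with_mask (num_frames : Int) (num_segments : Int) (out : List (List Int) × List (List Int)) : Prop := out = sliding_segment_with_mask_alt num_frames num_segments
instance (num_frames : Int) (num_segments : Int) (out : List (List Int) × List (List Int)) : Decidable (Spec_sliding_segment_with_mask num_frames num_segments out) := by unfold Spec_sliding_segment_with_mask; infer_instance

-- ===== CLAIM (what is proved, stated in full; the proofs are below) =====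
def Claim_equal_sliding_segment_with_mask : Prop := ∀ (num_frames : Int) (num_segments : Int), Dom_sliding_segment_with_mask num_frames num_segments → Pre_sliding_segment_with_mask num_frames num_segments → Spec_sliding_segment_with_mask num_frames num_segments (sliding_segment_with_mask num_frames num_segments)

-- ===== LEMMAS AND PROOFS =====

-- With num_segments < 0 every window of A's first loop is empty, its mask is empty and `seen` never grows.
lemma pv_loop1_neg (s n : Int) (hn : n ≤ 0) (l : List Int)
    (st : List (List Int) × List (List Int) × PySem.Set Int) :
    l.foldl (pvStepA1 s n) st = (st.1 ++ l.map (fun _ => []), st.2.1 ++ l.map (fun _ => []), st.2.2) := by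
  induction l generalizing st with
  | nil => simp
  | cons h t ih =>
    have hstep : pvStepA1 s n st h = (st.1 ++ [[]], st.2.1 ++ [[]], st.2.2) := by
      simp [pvStepA1, PySem.List.pyRange_one_eq_nil hn, PySem.Set.update_nil]
    rw [List.foldl_cons, hstep, ih]
    simp

-- A's first loop: every index `i*s+off` with off < k < s is fresh, so each mask is all ones and
-- `seen` collects exactly the grid {i*s+off : 0 ≤ i < n, 0 ≤ off < k}.
lemma pv_loop1_char (s n : Int) (k : Nat) (hk : (k : Int) ≤ s) :
    ∃ seen : PySem.Set Int,
      (PySem.List.pyRange 0 (k : Int) 1).foldl (pvStepA1 s n) ([], [], PySem.Set.empty)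
        = ((PySem.List.pyRange 0 (k : Int) 1).map (fun off => (PySem.List.pyRange 0 n 1).map (fun i => i * s + off)),
           List.replicate k (List.replicate n.toNat 1), seen)
      ∧ ∀ x : Int, x ∈ seen ↔ ∃ i off : Int, 0 ≤ i ∧ i < n ∧ 0 ≤ off ∧ off < (k : Int) ∧ x = i * s + off := by
  induction k with
  | zero =>
    refine ⟨PySem.Set.empty, by simp [PySem.List.pyRange_one_eq_nil (le_refl (0 : Int))], fun x => ?_⟩
    constructor
    · intro h; exact absurd h (List.not_mem_nil)
    · rintro ⟨i, off, -, -, ho, hk, -⟩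
      exact absurd (lt_of_le_of_lt ho hk) (by simp)
  | succ k ih =>
    have hk' : (k : Int) ≤ s := by push_cast at hk ⊢; omega
    have hks : (k : Int) < s := by push_cast at hk; omega
    have hs : 0 < s := lt_of_le_of_lt (Int.natCast_nonneg k) hks
    obtain ⟨seen, heq, hmem⟩ := ih hk'
    have hsplit : PySem.List.pyRange 0 ((k + 1 : Nat) : Int) 1
        = PySem.List.pyRange 0 (k : Int) 1 ++ [(k : Int)] := by
      push_cast
      exact PySem.List.pyRange_one_succ_right (Int.natCast_nonneg k)
    have hmask : ((PySem.List.pyRange 0 n 1).map (fun i => i * s + (k : Int))).map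
        (fun idx => if PySem.Set.contains seen idx then (0 : Int) else 1)
        = List.replicate n.toNat 1 := by
      rw [List.map_map]
      have hpt : ∀ i ∈ PySem.List.pyRange 0 n 1,
          ((fun idx => if PySem.Set.contains seen idx then (0 : Int) else 1) ∘ (fun i => i * s + (k : Int))) i
          = (fun _ => (1 : Int)) i := by
        intro i hi
        obtain ⟨hi0, hin⟩ := (PySem.List.mem_pyRange_one).1 hi
        simp only [Function.comp_apply]
        rw [if_neg]
        intro hc
        have hxmem : i * s + (k : Int) ∈ seen := (PySem.Set.contains_iff _ _).1 hc
        obtain ⟨i', off', h1, h2, h3, h4, h5⟩ := (hmem _).1 hxmem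
        rcases lt_trichotomy i i' with h | h | h
        · nlinarith [mul_le_mul_of_nonneg_right (show i + 1 ≤ i' by omega) (le_of_lt hs)]
        · subst h; linarith
        · nlinarith [mul_le_mul_of_nonneg_right (show i' + 1 ≤ i by omega) (le_of_lt hs)]
      rw [List.map_congr_left hpt, List.map_const', PySem.List.length_pyRange_one]
      norm_num
    refine ⟨PySem.Set.update seen ((PySem.List.pyRange 0 n 1).map (fun i => i * s + (k : Int))), ?_, fun x => ?_⟩
    · rw [hsplit, List.foldl_append, heq, List.foldl_cons, List.foldl_nil]
      show pvStepA1 s n _ _ = _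
      rw [pvStepA1]
      simp only [List.map_append, List.map_cons, List.map_nil, List.replicate_succ']
      rw [hmask]
    · rw [PySem.Set.mem_update, hmem]
      constructor
      · rintro (⟨i, off, h1, h2, h3, h4, h5⟩ | hx)
        · exact ⟨i, off, h1, h2, h3, by push_cast; omega, h5⟩
        · obtain ⟨i, hi, rfl⟩ := List.mem_map.1 hx
          obtain ⟨hi0, hin⟩ := (PySem.List.mem_pyRange_one).1 hi
          exact ⟨i, (k : Int), hi0, hin, Int.natCast_nonneg k, by push_cast; omega, rfl⟩
      · rintro ⟨i, off, h1, h2, h3, h4, rfl⟩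
        by_cases hoff : off < (k : Int)
        · exact Or.inl ⟨i, off, h1, h2, h3, hoff, rfl⟩
        · have hoe : off = (k : Int) := by push_cast at h4; omega
          subst hoe
          exact Or.inr (List.mem_map.2 ⟨i, (PySem.List.mem_pyRange_one).2 ⟨h1, h2⟩, rfl⟩)

-- the grid {i*s+off : 0 ≤ i < n, 0 ≤ off < s} is exactly the interval [0, n*s)
lemma pv_grid_interval (s n : Int) (hn : 0 < n) (hs : 0 ≤ s) (x : Int) :
    (∃ i off : Int, 0 ≤ i ∧ i < n ∧ 0 ≤ off ∧ off < s ∧ x = i * s + off) ↔ 0 ≤ x ∧ x < n * s := by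
  constructor
  · rintro ⟨i, off, hi0, hin, ho0, hos, rfl⟩
    constructor
    · nlinarith
    · nlinarith [mul_le_mul_of_nonneg_right (show i ≤ n - 1 by omega) hs]
  · rintro ⟨hx0, hxn⟩
    rcases eq_or_lt_of_le hs with h0 | hpos
    · exfalso; nlinarith
    · refine ⟨x / s, x % s, Int.ediv_nonneg hx0 hs, (Int.ediv_lt_iff_lt_mul hpos).mpr ?_,
        Int.emod_nonneg x (ne_of_gt hpos), Int.emod_lt_of_pos x hpos, ?_⟩
      · linarith
      · have h := Int.mul_ediv_add_emod x s
        linarith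

-- A's second loop starting from seen = [0, n*s): no index reaches num_frames (so the filter keeps
-- every window full), and only the window's top index n*s+off is fresh — except when s = 0, where
-- the window is `off` repeated and entirely fresh; `seen` stays the interval [0, n*s+k).
lemma pv_loop2_char (nf s n r : Int) (hn : 0 < n) (hs : 0 ≤ s) (hnf : s * n + r = nf)
    (rows0 masks0 : List (List Int)) (seen0 : PySem.Set Int)
    (hseen0 : ∀ x : Int, x ∈ seen0 ↔ 0 ≤ x ∧ x < n * s)
    (k : Nat) (hk : (k : Int) ≤ r) :
    ∃ seen : PySem.Set Int,
      (PySem.List.pyRange 0 (k : Int) 1).foldl (pvStepA2 nf s n) (rows0, masks0, seen0)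
        = (rows0 ++ (PySem.List.pyRange 0 (k : Int) 1).map (fun off => (PySem.List.pyRange 0 n 1).map (fun i => i * s + s + off)),
           masks0 ++ List.replicate k (if s = 0 then List.replicate n.toNat 1 else List.replicate (n - 1).toNat 0 ++ [1]),
           seen)
      ∧ ∀ x : Int, x ∈ seen ↔ 0 ≤ x ∧ x < n * s + (k : Int) := by
  induction k with
  | zero =>
    refine ⟨seen0, by simp [PySem.List.pyRange_one_eq_nil (le_refl (0 : Int))], fun x => ?_⟩
    rw [hseen0]; norm_num
  | succ k ih =>
    have hk' : (k : Int) ≤ r := by push_cast at hk ⊢; omega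
    have hkr : (k : Int) < r := by push_cast at hk; omega
    obtain ⟨seen, heq, hmem⟩ := ih hk'
    have hsplit : PySem.List.pyRange 0 ((k + 1 : Nat) : Int) 1
        = PySem.List.pyRange 0 (k : Int) 1 ++ [(k : Int)] := by
      push_cast
      exact PySem.List.pyRange_one_succ_right (Int.natCast_nonneg k)
    -- the window at offset k: no index reaches num_frames
    have hfilt : ((PySem.List.pyRange 0 n 1).map (fun i => i * s + s + (k : Int))).filter
        (fun idx => decide (idx < nf)) = (PySem.List.pyRange 0 n 1).map (fun i => i * s + s + (k : Int)) := by
      apply List.filter_eq_self.mpr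
      intro a ha
      obtain ⟨i, hi, rfl⟩ := List.mem_map.1 ha
      obtain ⟨hi0, hin⟩ := (PySem.List.mem_pyRange_one).1 hi
      simp only [decide_eq_true_eq]
      nlinarith [mul_le_mul_of_nonneg_right (show i ≤ n - 1 by omega) hs]
    have hne : ((PySem.List.pyRange 0 n 1).map (fun i => i * s + s + (k : Int))) ≠ [] := by
      intro h
      have := congrArg List.length h
      simp [PySem.List.length_pyRange_one] at this
      omega
    have hmask : ((PySem.List.pyRange 0 n 1).map (fun i => i * s + s + (k : Int))).map
        (fun idx => if PySem.Set.contains seen idx then (0 : Int) else 1)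
        = (if s = 0 then List.replicate n.toNat 1 else List.replicate (n - 1).toNat 0 ++ [1]) := by
      rw [List.map_map]
      by_cases hs0 : s = 0
      · rw [if_pos hs0]
        subst hs0
        have hpt : ∀ i ∈ PySem.List.pyRange 0 n 1,
            ((fun idx => if PySem.Set.contains seen idx then (0 : Int) else 1) ∘ (fun i => i * 0 + 0 + (k : Int))) i
            = (fun _ => (1 : Int)) i := by
          intro i hi
          simp only [Function.comp_apply, mul_zero, zero_add, add_zero]
          rw [if_neg]
          intro hc
          have := (hmem _).1 ((PySem.Set.contains_iff _ _).1 hc)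
          omega
        rw [List.map_congr_left hpt, List.map_const', PySem.List.length_pyRange_one]
        norm_num
      · rw [if_neg hs0]
        have hspos : 0 < s := lt_of_le_of_ne hs (Ne.symm hs0)
        have hnsplit : PySem.List.pyRange 0 n 1 = PySem.List.pyRange 0 (n - 1) 1 ++ [n - 1] := by
          have := PySem.List.pyRange_one_succ_right (a := 0) (b := n - 1) (by omega)
          rw [sub_add_cancel] at this
          exact this
        rw [hnsplit, List.map_append]
        have hpt0 : ∀ i ∈ PySem.List.pyRange 0 (n - 1) 1,
            ((fun idx => if PySem.Set.contains seen idx then (0 : Int) else 1) ∘ (fun i => i * s + s + (k : Int))) i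
            = (fun _ => (0 : Int)) i := by
          intro i hi
          obtain ⟨hi0, hin⟩ := (PySem.List.mem_pyRange_one).1 hi
          simp only [Function.comp_apply]
          rw [if_pos]
          apply (PySem.Set.contains_iff _ _).2
          apply (hmem _).2
          constructor
          · nlinarith
          · nlinarith [mul_le_mul_of_nonneg_right (show i + 1 ≤ n - 1 + 1 by omega) (le_of_lt hspos)]
        rw [List.map_congr_left hpt0, List.map_const', PySem.List.length_pyRange_one]
        simp only [List.map_cons, List.map_nil, Function.comp_apply]
        rw [if_neg]
        · norm_num
        · intro hc
          have := (hmem _).1 ((PySem.Set.contains_iff _ _).1 hc)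
          nlinarith
    refine ⟨PySem.Set.update seen ((PySem.List.pyRange 0 n 1).map (fun i => i * s + s + (k : Int))), ?_, fun x => ?_⟩
    · rw [hsplit, List.foldl_append, heq, List.foldl_cons, List.foldl_nil]
      show pvStepA2 nf s n _ _ = _
      rw [pvStepA2]
      simp only [hfilt]
      rw [if_neg (by simpa [List.isEmpty_iff] using hne)]
      simp only [List.map_append, List.map_cons, List.map_nil, List.replicate_succ']
      rw [hmask]
      simp [List.append_assoc]
    · rw [PySem.Set.mem_update, hmem]
      constructor
      · rintro (⟨h1, h2⟩ | hx)
        · refine ⟨h1, by push_cast; omega⟩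
        · obtain ⟨i, hi, rfl⟩ := List.mem_map.1 hx
          obtain ⟨hi0, hin⟩ := (PySem.List.mem_pyRange_one).1 hi
          constructor
          · nlinarith
          · push_cast
            nlinarith [mul_le_mul_of_nonneg_right (show i ≤ n - 1 by omega) hs]
      · rintro ⟨h1, h2⟩
        by_cases hlt : x < n * s + (k : Int)
        · exact Or.inl ⟨h1, hlt⟩
        · have hxe : x = n * s + (k : Int) := by push_cast at h2; omega
          refine Or.inr (List.mem_map.2 ⟨n - 1, (PySem.List.mem_pyRange_one).2 ⟨by omega, by omega⟩, ?_⟩)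
          rw [hxe]; ring

-- ===== VERDICT (by name: the statement is the Claim_ definition above) =====
theorem sliding_segment_with_mask_spec : Claim_equal_sliding_segment_with_mask := by
  intro nf n _ hpre
  obtain ⟨hn0, hcase⟩ := hpre
  unfold Spec_sliding_segment_with_mask
  simp only [sliding_segment_with_mask, sliding_segment_with_mask_alt]
  rcases lt_or_gt_of_ne hn0 with hn | hn
  · -- num_segments < 0: every window is empty and the remainder loop never runs
    have hr : PySem.Int.mod nf n ≤ 0 := (PySem.Int.mod_neg_bounds nf hn).2
    have hnle : n ≤ 0 := le_of_lt hn
    rw [if_neg (by omega)]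
    rw [pv_loop1_neg _ n hnle]
    simp [PySem.List.pyRange_one_eq_nil hnle, PySem.List.pyRange_one_eq_nil hr,
      PySem.List.pyRepeat_singleton, List.map_const', Int.toNat_of_nonpos hnle]
    omega
  · -- num_segments > 0
    have hsn := PySem.Int.floordiv_mul_add_mod nf n
    have hr0 : 0 ≤ PySem.Int.mod nf n := PySem.Int.mod_nonneg nf hn
    have hrn : PySem.Int.mod nf n < n := PySem.Int.mod_lt nf hn
    by_cases hnf : 0 ≤ nf
    · have hs0 : 0 ≤ PySem.Int.floordiv nf n := by
        rw [PySem.Int.floordiv_eq_ediv_of_pos hn]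
        exact Int.ediv_nonneg hnf (le_of_lt hn)
      obtain ⟨sn, hsn'⟩ : ∃ m : Nat, PySem.Int.floordiv nf n = (m : Int) :=
        ⟨_, (Int.toNat_of_nonneg hs0).symm⟩
      obtain ⟨rn, hrn'⟩ : ∃ m : Nat, PySem.Int.mod nf n = (m : Int) :=
        ⟨_, (Int.toNat_of_nonneg hr0).symm⟩
      rw [hsn', hrn'] at hsn ⊢
      obtain ⟨seen, heq, hmem⟩ := pv_loop1_char (sn : Int) n sn (le_refl _)
      have hmem' : ∀ x : Int, x ∈ seen ↔ 0 ≤ x ∧ x < n * (sn : Int) := fun x => by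
        rw [hmem]; exact pv_grid_interval _ n hn (Int.natCast_nonneg sn) x
      have hsecond : ∀ off : Int,
          (PySem.List.pyRange 0 n 1).map (fun i => i * (sn : Int) + (sn : Int) + off)
          = (PySem.List.pyRange 0 n 1).map (fun i => (i + 1) * (sn : Int) + off) :=
        fun off => List.map_congr_left fun i _ => by ring
      have hlens : ((PySem.List.pyRange 0 ((sn : Int)) 1).map
          (fun off => (PySem.List.pyRange 0 n 1).map (fun i => i * (sn : Int) + off))).length = sn := by
        simp [PySem.List.length_pyRange_one]
      by_cases hrpos : (rn : Int) > 0
      · rw [if_pos hrpos]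
        obtain ⟨seen2, heq2, -⟩ := pv_loop2_char nf (sn : Int) n (rn : Int) hn
          (Int.natCast_nonneg sn) hsn _ _ seen hmem' rn (le_refl _)
        rw [heq, heq2]
        refine Prod.ext ?_ ?_
        · simp only []
          congr 1
          exact List.map_congr_left fun off _ => hsecond off
        · simp only [hlens]
          simp [PySem.List.pyRepeat_singleton, PySem.List.length_pyRange_one]
      · have hrz : rn = 0 := by omega
        subst hrz
        rw [if_neg hrpos, heq]
        refine Prod.ext ?_ ?_
        · simp [PySem.List.pyRange_one_eq_nil (le_refl (0 : Int))]
        · simp only [hlens]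
          simp [PySem.List.pyRange_one_eq_nil (le_refl (0 : Int)), PySem.List.pyRepeat_singleton]
    · -- num_frames < 0 with n > 0: Pre_ forces the remainder to be 0, both sides are empty
      have hrz : PySem.Int.mod nf n = 0 := by
        rcases hcase with h | h | h
        · exact absurd h hnf
        · exact absurd h (by omega)
        · exact h
      have hsneg : PySem.Int.floordiv nf n ≤ 0 := by nlinarith [hsn, hrz]
      rw [hrz]
      rw [if_neg (by omega)]
      simp [PySem.List.pyRange_one_eq_nil hsneg, PySem.List.pyRange_one_eq_nil (le_refl (0 : Int))]
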